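-- pv_equiv track=rewrite | github.com/dmr-analysis/dds-analysis | build/lib/dds_analysis/script/script_high/plot_TSSdistanceRegion.py | same_length_regions
-- ===== SOURCE A (Python) =====
-- def same_length_regions(regions):
--     """Checks if all TSS, geneBody and TES is provided for all samples to be plotted
--     """
--     length = []
--     for region in regions:
--         length.append(len(regions[region]))
--     #added by jbw
--     if sum(length)>0:
--       out_term= all(x == length[0] for x in length)
--     else:
--       #all are empty
--       out_term=False
--     return out_term
-- ===== SOURCE B (Python) =====
-- def same_length_regions(regions):
--     it = iter(regions.values())
--     first = next(it, None)
--     if first is None: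
--         return False
--     n = len(first)
--     if n == 0:
--         return False
--     for v in it:
--         if len(v) != n:
--             return False
--     return True
-- ===== Notes on version B (the rewrite author's own statement) =====
-- stated objective: idiomatic
-- what changed: Replaces A's staged passes (build a list of lengths, sum it, then test all-equal-to-first) by an early-exit single scan: peel the first value off an iterator, fail fast if absent or empty, then short-circuit on the first mismatching length without materialising any list.
import Mathlib
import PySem

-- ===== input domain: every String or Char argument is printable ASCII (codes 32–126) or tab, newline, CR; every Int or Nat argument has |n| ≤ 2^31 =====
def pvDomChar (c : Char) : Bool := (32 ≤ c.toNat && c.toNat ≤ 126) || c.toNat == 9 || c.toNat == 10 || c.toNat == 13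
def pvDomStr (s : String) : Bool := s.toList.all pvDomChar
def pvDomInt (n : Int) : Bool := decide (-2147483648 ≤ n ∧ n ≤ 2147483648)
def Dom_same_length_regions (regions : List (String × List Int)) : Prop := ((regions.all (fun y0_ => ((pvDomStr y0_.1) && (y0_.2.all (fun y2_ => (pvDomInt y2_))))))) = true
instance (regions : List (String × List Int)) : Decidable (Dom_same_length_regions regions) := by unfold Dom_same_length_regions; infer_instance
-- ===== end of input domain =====

-- B replaces A's staged passes (length list + sum + all-equal-to-first) by an early-exit scan: peel the first value, fail fast if absent or empty, then short-circuit on the first mismatching length (objective: idiomatic).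

-- ===== PORT A =====
def same_length_regions (regions : List (String × List Int)) : Bool :=
  let length : List Int := regions.foldl (fun acc region => acc ++ [(region.2.length : Int)]) []
  if length.sum > 0 then
    length.all (fun x => x == (PySem.List.pyGet? length 0).getD 0)
  else
    false

-- ===== PORT B =====
-- the for-loop with early return over the remaining values, as structural recursion against the expected length n
def restMatch (n : Int) : List (List Int) → Bool
  | [] => true
  | v :: vs => ((v.length : Int) == n) && restMatch n vs

def same_length_regions_alt (regions : List (String × List Int)) : Bool :=
  match regions.map (fun r => r.2) with
  | [] => false
  | v :: vs =>
    let n : Int := (v.length : Int)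
    if n == 0 then false else restMatch n vs

-- ===== PRECONDITION & SPEC =====
def Spec_same_length_regions (regions : List (String × List Int)) (out : Bool) : Prop := out = same_length_regions_alt regions
instance (regions : List (String × List Int)) (out : Bool) : Decidable (Spec_same_length_regions regions out) := by unfold Spec_same_length_regions; infer_instance

-- ===== CLAIM (what is proved, stated in full; the proofs are below) =====
def Claim_equal_same_length_regions : Prop := ∀ (regions : List (String × List Int)), Dom_same_length_regions regions → Spec_same_length_regions regions (same_length_regions regions)

-- ===== LEMMAS AND PROOFS =====

theorem foldl_append_map (l : List (String × List Int)) (acc : List Int) :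
    l.foldl (fun a x => a ++ [(x.2.length : Int)]) acc = acc ++ l.map (fun x => (x.2.length : Int)) := by
  induction l generalizing acc with
  | nil => simp
  | cons h t ih => simp [List.foldl, ih]

theorem restMatch_eq_all (n : Int) (t : List Int) (vs : List (List Int))
    (ht : t = vs.map (fun v => (v.length : Int))) :
    restMatch n vs = t.all (fun x => x == n) := by
  induction vs generalizing t with
  | nil => subst ht; simp [restMatch]
  | cons v rest ih => subst ht; simp [restMatch, ih _ rfl]

theorem sum_nonpos_list (L : List Int) (hc : ∀ x ∈ L, x ≤ 0) : L.sum ≤ 0 := by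
  induction L with
  | nil => simp
  | cons a t ih =>
    have := ih (fun x hx => hc x (by simp [hx]))
    have := hc a (by simp)
    simp; omega

theorem sum_pos_exists (L : List Int) (hnn : ∀ x ∈ L, 0 ≤ x) (h : L.sum > 0) :
    ∃ x ∈ L, 0 < x := by
  by_contra hc
  push_neg at hc
  have := sum_nonpos_list L hc
  omega

theorem sum_nonneg_list (L : List Int) (hnn : ∀ x ∈ L, 0 ≤ x) : 0 ≤ L.sum := by
  induction L with
  | nil => simp
  | cons a t ih =>
    have := ih (fun x hx => hnn x (by simp [hx]))
    have := hnn a (by simp)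
    simp; omega

theorem core (h : Int) (t : List Int) (hh : 0 ≤ h) (hnn : ∀ x ∈ t, 0 ≤ x) :
    (if (h :: t).sum > 0 then (h :: t).all (fun x => x == h) else false)
      = (if h == 0 then false else t.all (fun x => x == h)) := by
  by_cases hz : h = 0
  · subst hz
    simp only [beq_self_eq_true, if_true]
    by_cases hs : (0 :: t).sum > 0
    · rw [if_pos hs]
      obtain ⟨x, hx, hxpos⟩ := sum_pos_exists _ (by intro x hx; simp at hx
                                                    rcases hx with rfl | hx
                                                    · exact le_refl 0
                                                    · exact hnn x hx) hs
      simp at hx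
      rcases hx with rfl | hx
      · omega
      · rw [List.all_eq_false]
        refine ⟨x, by simp [hx], by simp; omega⟩
    · rw [if_neg hs]
  · have hpos : 0 < h := lt_of_le_of_ne hh (Ne.symm hz)
    have hs : (h :: t).sum > 0 := by
      have := sum_nonneg_list t hnn
      simp; omega
    rw [if_pos hs, if_neg (by simp [hz])]
    simp

-- ===== VERDICT (by name: the statement is the Claim_ definition above) =====
theorem same_length_regions_spec : Claim_equal_same_length_regions := by
  intro regions _
  unfold Spec_same_length_regions same_length_regions same_length_regions_alt
  rw [foldl_append_map]
  simp only [List.nil_append]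
  cases regions with
  | nil => simp
  | cons r rs =>
    simp only [List.map_cons]
    have hnn : ∀ x ∈ rs.map (fun x => ((x.2.length : Int))), 0 ≤ x := by
      intro x hx; simp at hx; obtain ⟨a, b, hb, rfl⟩ := hx; positivity
    have := core ((r.2.length : Int)) (rs.map (fun x => ((x.2.length : Int)))) (by positivity) hnn
    have hget : (PySem.List.pyGet? ((r.2.length : Int) :: rs.map (fun x => ((x.2.length : Int)))) 0).getD 0 = (r.2.length : Int) := by
      simp [PySem.List.pyGet?, PySem.List.pyIdx?]
    simp only [hget]
    rw [this]
    by_cases hz : ((r.2.length : Int) == 0)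
    · simp [hz]
    · rw [if_neg hz, if_neg hz]
      rw [restMatch_eq_all _ (rs.map (fun x => ((x.2.length : Int)))) (rs.map (fun r => r.2)) (by simp)]
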